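-- pv_equiv track=rewrite | github.com/smartfastlabs/fastapi-dev-proxy | src/fastapi_dev_proxy/protocol.py | match_path
-- ===== SOURCE A (Python) =====
-- def normalize_path(path: str) -> str:
--     """Normalize a path for matching override paths."""
--
--     if not path:
--         return "/"
--     if not path.startswith("/"):
--         path = f"/{path}"
--     if len(path) > 1 and path.endswith("/"):
--         path = path.rstrip("/")
--     return path
--
-- def match_path(path: str, pattern: str) -> bool:
--     """Match a request path against a pattern."""
--
--     normalized_path = normalize_path(path)
--     normalized_pattern = normalize_path(pattern)
--
--     if normalized_pattern == "/":
--         return normalized_path == "/"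
--
--     if normalized_pattern.endswith("/**"):
--         prefix = normalized_pattern[:-3]
--         return normalized_path == prefix or normalized_path.startswith(f"{prefix}/")
--
--     path_segments = normalized_path.strip("/").split("/") if normalized_path != "/" else []
--     pattern_segments = normalized_pattern.strip("/").split("/") if normalized_pattern != "/" else []
--
--     if len(path_segments) != len(pattern_segments):
--         return False
--
--     for path_segment, pattern_segment in zip(path_segments, pattern_segments):
--         if _is_wildcard_segment(pattern_segment):
--             continue
--         if path_segment != pattern_segment:
--             return False
--     return True
--
-- def _is_wildcard_segment(segment: str) -> bool:
--     return (
--         segment == "*"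
--         or (segment.startswith("{") and segment.endswith("}"))
--         or (segment.startswith("<") and segment.endswith(">"))
--     )
-- ===== SOURCE B (Python) =====
-- def normalize_path(path: str) -> str:
--     """Normalize a path for matching override paths."""
--
--     if not path:
--         return "/"
--     if not path.startswith("/"):
--         path = f"/{path}"
--     if len(path) > 1 and path.endswith("/"):
--         path = path.rstrip("/")
--     return path
--
--
-- def _is_wildcard_segment(segment: str) -> bool:
--     return (
--         segment == "*"
--         or (segment.startswith("{") and segment.endswith("}"))
--         or (segment.startswith("<") and segment.endswith(">"))
--     )
--
--
-- def _match(p: str, q: str) -> bool: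
--     """Match path text p against pattern text q segment by segment, in place,
--     without building segment lists."""
--     i = p.find("/")
--     j = q.find("/")
--     ph = p if i < 0 else p[:i]
--     qh = q if j < 0 else q[:j]
--     if not _is_wildcard_segment(qh) and ph != qh:
--         return False
--     if i < 0 or j < 0:
--         return i < 0 and j < 0
--     return _match(p[i + 1:], q[j + 1:])
--
--
-- def match_path(path: str, pattern: str) -> bool:
--     """Match a request path against a pattern."""
--
--     normalized_path = normalize_path(path)
--     normalized_pattern = normalize_path(pattern)
--
--     if normalized_pattern == "/":
--         return normalized_path == "/"
--
--     if normalized_pattern.endswith("/**"):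
--         prefix = normalized_pattern[:-3]
--         return normalized_path == prefix or normalized_path.startswith(f"{prefix}/")
--
--     if normalized_path == "/":
--         return False
--
--     return _match(normalized_path.strip("/"), normalized_pattern.strip("/"))
-- ===== Notes on version B (the rewrite author's own statement) =====
-- stated objective: alternative
-- what changed: The general case no longer builds the two segment lists, checks their lengths and loops over zip: B matches the stripped path text against the stripped pattern text in place, recursively slicing off one '/'-delimited segment from each string per step (find + slice), with length mismatch falling out of the recursion.
import Mathlib
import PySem

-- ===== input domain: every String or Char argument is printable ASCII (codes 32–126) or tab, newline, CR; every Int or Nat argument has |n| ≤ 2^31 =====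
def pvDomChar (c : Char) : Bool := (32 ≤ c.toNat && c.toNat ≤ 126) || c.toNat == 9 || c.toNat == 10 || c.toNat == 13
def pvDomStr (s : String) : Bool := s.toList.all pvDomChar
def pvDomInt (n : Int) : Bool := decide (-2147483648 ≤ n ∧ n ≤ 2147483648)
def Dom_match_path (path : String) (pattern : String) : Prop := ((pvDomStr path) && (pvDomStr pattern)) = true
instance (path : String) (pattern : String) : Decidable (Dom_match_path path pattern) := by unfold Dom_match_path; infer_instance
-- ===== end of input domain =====

-- B keeps A's normalization and special cases but replaces the general case's
-- split-into-lists + length check + zip loop by an in-place recursive matcher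
-- that slices one '/'-delimited segment off each string per step (alternative
-- decomposition, same cost).
-- Source A and Source B contain IDENTICAL helpers normalize_path and _is_wildcard_segment;
-- they are ported once below and used by both ports.

-- ===== PORT A =====
-- hand port of str.rstrip("/") (PySem has no per-character rstrip): drop trailing '/'s; exact
def pvRstripSlashes (s : List Char) : List Char := (s.reverse.dropWhile (fun c => c == '/')).reverse

-- normalize_path, shared helper (identical in Source A and Source B)
def pvNormalize (p : List Char) : List Char :=
  if p = [] then ['/']
  else
    let p1 := if PySem.Chars.startswith p ['/'] then p else '/' :: p
    if 1 < p1.length ∧ PySem.Chars.endswith p1 ['/'] then pvRstripSlashes p1 else p1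

-- _is_wildcard_segment, shared helper (identical in Source A and Source B)
def pvIsWildcard (seg : List Char) : Bool :=
  seg == ['*']
  || (PySem.Chars.startswith seg ['{'] && PySem.Chars.endswith seg ['}'])
  || (PySem.Chars.startswith seg ['<'] && PySem.Chars.endswith seg ['>'])

-- A's for-loop over zip(path_segments, pattern_segments) with early return False
def pvLoopA : List (List Char × List Char) → Bool
  | [] => true
  | (ps, qs) :: rest =>
    if pvIsWildcard qs then pvLoopA rest
    else if ps ≠ qs then false
    else pvLoopA rest

def match_path_chars (path pattern : List Char) : Bool :=
  let np := pvNormalize path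
  let npat := pvNormalize pattern
  if npat = ['/'] then np == ['/']
  else if PySem.Chars.endswith npat ['/', '*', '*'] then
    let pre := PySem.Chars.slice npat none (some (-3))
    np == pre || PySem.Chars.startswith np (pre ++ ['/'])
  else
    let pathSegs := if np ≠ ['/'] then PySem.Chars.splitOn (PySem.Chars.stripChars np ['/']) ['/'] else []
    let patSegs := if npat ≠ ['/'] then PySem.Chars.splitOn (PySem.Chars.stripChars npat ['/']) ['/'] else []
    if pathSegs.length ≠ patSegs.length then false
    else pvLoopA (pathSegs.zip patSegs)

def match_path (path : String) (pattern : String) : Bool :=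
  match_path_chars path.toList pattern.toList

-- ===== PORT B =====
-- Source B's _match: recursive segment-by-segment matcher over the raw text
def pvMatchB (p q : List Char) : Bool :=
  let i := PySem.Chars.find p ['/']
  let j := PySem.Chars.find q ['/']
  let ph := if i < 0 then p else PySem.Chars.slice p none (some i)
  let qh := if j < 0 then q else PySem.Chars.slice q none (some j)
  if ¬ pvIsWildcard qh ∧ ph ≠ qh then false
  else if i < 0 ∨ j < 0 then decide (i < 0 ∧ j < 0)
  else pvMatchB (PySem.Chars.slice p (some (i + 1)) none) (PySem.Chars.slice q (some (j + 1)) none)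
termination_by p.length
decreasing_by
  rename_i hij
  push Not at hij
  have hi : (0 : Int) ≤ PySem.Chars.find p ['/'] := hij.1
  have hne : p ≠ [] := by
    intro h
    subst h
    have : ¬ ((['/'] : List Char) <:+: ([] : List Char)) := by
      intro hcon
      simpa using hcon.sublist.length_le
    exact this ((PySem.Chars.find_nonneg_iff _ _).mp hi)
  have hlen : 0 < p.length := List.length_pos_iff.mpr hne
  rw [PySem.Chars.slice_eq_listSlice, PySem.List.slice_from _ (by omega)]
  simp only [List.length_drop]
  omega

def match_path_alt_chars (path pattern : List Char) : Bool :=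
  let np := pvNormalize path
  let npat := pvNormalize pattern
  if npat = ['/'] then np == ['/']
  else if PySem.Chars.endswith npat ['/', '*', '*'] then
    let pre := PySem.Chars.slice npat none (some (-3))
    np == pre || PySem.Chars.startswith np (pre ++ ['/'])
  else if np = ['/'] then false
  else pvMatchB (PySem.Chars.stripChars np ['/']) (PySem.Chars.stripChars npat ['/'])

def match_path_alt (path : String) (pattern : String) : Bool :=
  match_path_alt_chars path.toList pattern.toList

-- ===== PRECONDITION & SPEC =====
def Spec_match_path (path : String) (pattern : String) (out : Bool) : Prop := out = match_path_alt path pattern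
instance (path : String) (pattern : String) (out : Bool) : Decidable (Spec_match_path path pattern out) := by unfold Spec_match_path; infer_instance

-- ===== CLAIM (what is proved, stated in full; the proofs are below) =====
def Claim_equal_match_path : Prop := ∀ (path : String) (pattern : String), Dom_match_path path pattern → Spec_match_path path pattern (match_path path pattern)

-- ===== LEMMAS AND PROOFS =====

-- reference splitter: structural recursion splitting on '/'
def mySplit : List Char → List (List Char)
  | [] => [[]]
  | c :: r =>
    let s := mySplit r
    if c = '/' then [] :: s else (c :: s.headD []) :: s.tail

theorem mySplit_ne_nil (s : List Char) : mySplit s ≠ [] := by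
  cases s with
  | nil => simp [mySplit]
  | cons c r => by_cases h : c = '/' <;> simp [mySplit, h]

theorem mySplit_cons_head (s : List Char) :
    (mySplit s).headD [] :: (mySplit s).tail = mySplit s := by
  cases h : mySplit s with
  | nil => exact absurd h (mySplit_ne_nil s)
  | cons a t => simp

theorem mySplit_no_slash (s : List Char) (h : '/' ∉ s) : mySplit s = [s] := by
  induction s with
  | nil => rfl
  | cons c r ih =>
    have hc : c ≠ '/' := by intro hc; exact h (by simp [hc])
    have hr : '/' ∉ r := fun hm => h (by simp [hm])
    simp [mySplit, hc, ih hr]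

theorem mySplit_append (a r : List Char) (h : '/' ∉ a) :
    mySplit (a ++ '/' :: r) = a :: mySplit r := by
  induction a with
  | nil => simp [mySplit]
  | cons c t ih =>
    have hc : c ≠ '/' := by intro hc; exact h (by simp [hc])
    have ht : '/' ∉ t := fun hm => h (by simp [hm])
    have h2 := ih ht
    simp only [List.cons_append, mySplit, h2, if_neg hc]
    simp

theorem splitOn_go_eq : ∀ (fuel : Nat) (l cur : List Char) (accs : List (List Char)),
    l.length < fuel →
    PySem.Chars.splitOn.go ['/'] fuel l cur accs =
      accs.reverse ++ (cur.reverse ++ (mySplit l).headD []) :: (mySplit l).tail := by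
  intro fuel
  induction fuel with
  | zero => intro l cur accs h; omega
  | succ n ih =>
    intro l cur accs h
    cases l with
    | nil =>
      rw [PySem.Chars.splitOn.go] <;> simp [mySplit]
    | cons c rest =>
      rw [PySem.Chars.splitOn.go]
      by_cases hc : c = '/'
      · subst hc
        have hpre : List.isPrefixOf ['/'] ('/' :: rest) = true := by
          simp [List.isPrefixOf]
        rw [if_pos hpre]
        have hrec := ih (List.drop (['/'] : List Char).length ('/' :: rest)) []
          (cur.reverse :: accs) (by simp at h ⊢; omega)
        rw [hrec]
        simp [mySplit]
        simpa using mySplit_cons_head rest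
      · have hpre : List.isPrefixOf ['/'] (c :: rest) = false := by
          simp [List.isPrefixOf]
          exact fun hcon => hc hcon.symm
        rw [if_neg (by simp [hpre])]
        have hrec := ih rest (c :: cur) accs (by simp at h ⊢; omega)
        rw [hrec]
        simp [mySplit, hc]

theorem splitOn_eq_mySplit (s : List Char) :
    PySem.Chars.splitOn s ['/'] = mySplit s := by
  rw [PySem.Chars.splitOn]
  rw [splitOn_go_eq (s.length + 1) s [] [] (by omega)]
  simpa using mySplit_cons_head s

theorem slash_mem_infix (p : List Char) (h : '/' ∈ p) : (['/'] : List Char) <:+: p := by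
  rcases List.append_of_mem h with ⟨s, t, rfl⟩
  exact ⟨s, t, by simp⟩

theorem find_slash_neg (p : List Char) (h : PySem.Chars.find p ['/'] < 0) : '/' ∉ p := by
  intro hm
  have : (0 : Int) ≤ PySem.Chars.find p ['/'] :=
    (PySem.Chars.find_nonneg_iff _ _).mpr (slash_mem_infix p hm)
  omega

theorem find_slash_decomp (p : List Char) (h : 0 ≤ PySem.Chars.find p ['/']) :
    '/' ∉ p.take (PySem.Chars.find p ['/']).toNat ∧
    (PySem.Chars.find p ['/']).toNat < p.length ∧
    p = p.take (PySem.Chars.find p ['/']).toNat ++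
        '/' :: p.drop ((PySem.Chars.find p ['/']).toNat + 1) := by
  obtain ⟨hpre, hmin⟩ := PySem.Chars.find_spec (s := p) (sub := ['/']) h
  set i := (PySem.Chars.find p ['/']).toNat with hi
  have hlen : i < p.length := by
    rcases hpre with ⟨t, ht⟩
    have h0 : 0 < (p.drop i).length := by rw [← ht]; simp
    simp at h0
    omega
  have hgl : p[i] = '/' := by
    rcases hpre with ⟨t, ht⟩
    rw [List.drop_eq_getElem_cons hlen] at ht
    exact ((List.cons.injEq _ _ _ _).mp ht).1.symm
  refine ⟨?_, hlen, ?_⟩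
  · intro hm
    rw [List.mem_take_iff_getElem] at hm
    obtain ⟨k, hk, hkv⟩ := hm
    have hklt : k < i := by omega
    have hkp : k < p.length := by omega
    apply hmin k hklt
    rw [List.drop_eq_getElem_cons hkp, hkv]
    exact ⟨p.drop (k + 1), rfl⟩
  · conv_lhs => rw [← List.take_append_drop i p]
    rw [List.drop_eq_getElem_cons hlen, hgl]

-- A's length-check + zip-loop on cons segments, one step
theorem segStep (a b : List Char) (ps qs : List (List Char)) :
    (if (a :: ps).length ≠ (b :: qs).length then false
     else pvLoopA ((a :: ps).zip (b :: qs)))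
    = (if ¬ pvIsWildcard b ∧ a ≠ b then false
       else (if ps.length ≠ qs.length then false else pvLoopA (ps.zip qs))) := by
  by_cases hw : pvIsWildcard b = true <;>
    by_cases hab : a = b <;>
      by_cases hl : ps.length = qs.length <;>
        simp [pvLoopA, hw, hab, hl]

-- the RHS of the bridge, abbreviated for the proofs
def segRHS (p q : List Char) : Bool :=
  if (mySplit p).length ≠ (mySplit q).length then false
  else pvLoopA ((mySplit p).zip (mySplit q))

theorem segRHS_and (p q : List Char) :
    segRHS p q = (decide ((mySplit p).length = (mySplit q).length) &&
      pvLoopA ((mySplit p).zip (mySplit q))) := by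
  unfold segRHS
  by_cases h : (mySplit p).length = (mySplit q).length <;> simp [h]

theorem matchB_noslash (p q : List Char) (hi : PySem.Chars.find p ['/'] < 0) :
    pvMatchB p q = segRHS p q := by
  have hps := mySplit_no_slash p (find_slash_neg p hi)
  rw [pvMatchB]
  unfold segRHS
  rcases lt_or_ge (PySem.Chars.find q ['/']) 0 with hj | hj
  · have hqs := mySplit_no_slash q (find_slash_neg q hj)
    rw [hps, hqs]
    by_cases hw : pvIsWildcard q = true <;> by_cases hab : p = q <;>
      simp [pvLoopA, hw, hab, hi, hj]
  · obtain ⟨hnb, hql, hq⟩ := find_slash_decomp q hj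
    have hqseg : mySplit q = q.take (PySem.Chars.find q ['/']).toNat ::
        mySplit (q.drop ((PySem.Chars.find q ['/']).toNat + 1)) := by
      conv_lhs => rw [hq]
      exact mySplit_append _ _ hnb
    have htl : 0 < (mySplit (q.drop ((PySem.Chars.find q ['/']).toNat + 1))).length :=
      List.length_pos_iff.mpr (mySplit_ne_nil _)
    have hj' : ¬ (PySem.Chars.find q ['/'] < 0) := by omega
    have hne : (mySplit p).length ≠ (mySplit q).length := by
      rw [hps, hqseg]
      simp only [List.length_cons, List.length_nil]
      omega
    rw [if_pos hne]
    simp [hi, hj']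

theorem matchB_qnoslash (p q : List Char) (hi : 0 ≤ PySem.Chars.find p ['/'])
    (hj : PySem.Chars.find q ['/'] < 0) :
    pvMatchB p q = segRHS p q := by
  have hqs := mySplit_no_slash q (find_slash_neg q hj)
  obtain ⟨hna, hpl, hpd⟩ := find_slash_decomp p hi
  have hpseg : mySplit p = p.take (PySem.Chars.find p ['/']).toNat ::
      mySplit (p.drop ((PySem.Chars.find p ['/']).toNat + 1)) := by
    conv_lhs => rw [hpd]
    exact mySplit_append _ _ hna
  have htl : 0 < (mySplit (p.drop ((PySem.Chars.find p ['/']).toNat + 1))).length :=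
    List.length_pos_iff.mpr (mySplit_ne_nil _)
  have hi' : ¬ (PySem.Chars.find p ['/'] < 0) := by omega
  rw [pvMatchB]
  unfold segRHS
  have hne : (mySplit p).length ≠ (mySplit q).length := by
    rw [hqs, hpseg]
    simp only [List.length_cons, List.length_nil]
    omega
  rw [if_pos hne]
  simp [hi', hj]

theorem matchB_eq_segs_aux : ∀ (n : Nat) (p q : List Char), p.length ≤ n →
    pvMatchB p q = segRHS p q := by
  intro n
  induction n with
  | zero =>
    intro p q hp
    have hp0 : p = [] := by
      cases p with
      | nil => rfl
      | cons c r => simp at hp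
    subst hp0
    exact matchB_noslash [] q (by decide)
  | succ n ih =>
    intro p q hp
    rcases lt_or_ge (PySem.Chars.find p ['/']) 0 with hi | hi
    · exact matchB_noslash p q hi
    rcases lt_or_ge (PySem.Chars.find q ['/']) 0 with hj | hj
    · exact matchB_qnoslash p q hi hj
    -- both contain a slash: one recursive step
    obtain ⟨hna, hpl, hpd⟩ := find_slash_decomp p hi
    obtain ⟨hnb, hql, hq⟩ := find_slash_decomp q hj
    have hpseg : mySplit p = p.take (PySem.Chars.find p ['/']).toNat ::
        mySplit (p.drop ((PySem.Chars.find p ['/']).toNat + 1)) := by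
      conv_lhs => rw [hpd]
      exact mySplit_append _ _ hna
    have hqseg : mySplit q = q.take (PySem.Chars.find q ['/']).toNat ::
        mySplit (q.drop ((PySem.Chars.find q ['/']).toNat + 1)) := by
      conv_lhs => rw [hq]
      exact mySplit_append _ _ hnb
    have hi' : ¬ (PySem.Chars.find p ['/'] < 0) := by omega
    have hj' : ¬ (PySem.Chars.find q ['/'] < 0) := by omega
    have hrec := ih (p.drop ((PySem.Chars.find p ['/']).toNat + 1))
      (q.drop ((PySem.Chars.find q ['/']).toNat + 1))
      (by simp; omega)
    have hsl1 : PySem.List.slice p (some (PySem.Chars.find p ['/'] + 1)) none =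
        p.drop ((PySem.Chars.find p ['/']).toNat + 1) := by
      rw [PySem.List.slice_from _ (by omega)]
      congr 1
      omega
    have hsl2 : PySem.List.slice q (some (PySem.Chars.find q ['/'] + 1)) none =
        q.drop ((PySem.Chars.find q ['/']).toNat + 1) := by
      rw [PySem.List.slice_from _ (by omega)]
      congr 1
      omega
    have hsl3 : PySem.List.slice p none (some (PySem.Chars.find p ['/'])) =
        p.take (PySem.Chars.find p ['/']).toNat := by
      rw [PySem.List.slice_to _ hi]
    have hsl4 : PySem.List.slice q none (some (PySem.Chars.find q ['/'])) =
        q.take (PySem.Chars.find q ['/']).toNat := by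
      rw [PySem.List.slice_to _ hj]
    rw [pvMatchB]
    unfold segRHS
    rw [hpseg, hqseg, segStep]
    simp [hi', hj', hsl1, hsl2, hsl3, hsl4, hrec, segRHS_and]

theorem matchB_eq_segs (p q : List Char) :
    pvMatchB p q =
      (if (mySplit p).length ≠ (mySplit q).length then false
       else pvLoopA ((mySplit p).zip (mySplit q))) :=
  matchB_eq_segs_aux p.length p q le_rfl

-- ===== VERDICT (by name: the statement is the Claim_ definition above) =====
theorem match_path_spec : Claim_equal_match_path := by
  intro path pattern _
  unfold Spec_match_path match_path match_path_alt match_path_chars match_path_alt_chars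
  set np := pvNormalize path.toList
  set npat := pvNormalize pattern.toList
  by_cases h1 : npat = ['/']
  · simp [h1]
  · by_cases h2 : PySem.Chars.endswith npat ['/', '*', '*'] = true
    · simp [h1, h2]
    · by_cases h3 : np = ['/']
      · have hlen : (mySplit (PySem.Chars.stripChars npat ['/'])).length ≠ 0 :=
          fun hcon => mySplit_ne_nil _ (List.length_eq_zero_iff.mp hcon)
        simp [h1, h2, h3, splitOn_eq_mySplit]
        omega
      · simp [h1, h2, h3, splitOn_eq_mySplit, matchB_eq_segs]
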